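-- pv_equiv track=rewrite | github.com/torisutansan02/Grokking-Series | Data Manipulation/practice.py | merge_and_sum_purchases
-- ===== SOURCE A (Python) =====
-- from typing import List, Dict
-- from typing import List, Dict
-- from typing import List, Dict
-- from typing import List, Dict
-- from typing import List, Dict
-- from typing import List, Dict
-- from typing import List, Dict
-- from typing import List, Dict
-- from typing import List, Dict
-- from typing import List, Dict
-- from typing import List, Dict
-- from typing import List, Dict
-- from typing import List, Dict
-- from typing import List, Dict
-- from typing import List, Dict
-- from typing import List, Dict
-- from typing import List, Dict
-- from typing import List, Dict
-- from typing import List, Dict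
--
-- def merge_and_sum_purchases(sourceA: List[Dict], sourceB: List[Dict]) -> List[Dict]:
--     merged = {}
--
--     def merge(source):
--         for user in source:
--             uid = user["user_id"]
--             amt = user["amount"]
--
--             merged[uid] = merged.get(uid, 0) + amt
--
--     merge(sourceA)
--     merge(sourceB)
--
--     return [{"user_id": uid, "amount": amt} for uid, amt in merged.items()]
-- ===== SOURCE B (Python) =====
-- def merge_and_sum_purchases(sourceA, sourceB):
--     # No dict at all: stage 1 flattens both sources to (uid, amount) pairs,
--     # stage 2 collects the distinct uids in first-appearance order,
--     # stage 3 computes each user's total by scanning the pairs.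
--     pairs = [(u["user_id"], u["amount"]) for u in sourceA] + \
--             [(u["user_id"], u["amount"]) for u in sourceB]
--     uids = []
--     for uid, _ in pairs:
--         if uid not in uids:
--             uids.append(uid)
--     return [{"user_id": uid, "amount": sum(a for p, a in pairs if p == uid)}
--             for uid in uids]
-- ===== Notes on version B (the rewrite author's own statement) =====
-- stated objective: alternative
-- what changed: B uses no dictionary: it flattens both sources to (uid, amount) pairs, dedups the uids in first-appearance order with a list membership pass, and computes each total by a brute-force scan of the pairs, instead of A's single-pass hash aggregation materialized from dict.items(); Pre_ excludes records missing the user_id or amount key, on which A (and B) raise KeyError.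
import Mathlib
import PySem

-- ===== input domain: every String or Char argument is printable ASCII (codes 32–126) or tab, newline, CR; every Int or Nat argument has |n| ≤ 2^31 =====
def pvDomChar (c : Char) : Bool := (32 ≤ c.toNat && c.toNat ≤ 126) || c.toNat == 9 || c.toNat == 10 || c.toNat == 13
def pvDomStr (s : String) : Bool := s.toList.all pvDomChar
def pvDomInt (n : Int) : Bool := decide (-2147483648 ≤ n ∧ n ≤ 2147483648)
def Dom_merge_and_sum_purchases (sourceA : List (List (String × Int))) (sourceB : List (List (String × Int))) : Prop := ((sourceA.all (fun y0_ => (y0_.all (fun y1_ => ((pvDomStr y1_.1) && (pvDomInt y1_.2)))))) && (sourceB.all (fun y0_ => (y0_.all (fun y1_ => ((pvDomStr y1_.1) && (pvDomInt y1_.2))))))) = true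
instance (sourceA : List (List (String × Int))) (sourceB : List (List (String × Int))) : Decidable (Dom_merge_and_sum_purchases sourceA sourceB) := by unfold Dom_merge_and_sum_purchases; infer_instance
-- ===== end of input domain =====

-- B replaces A's dict aggregation by a dict-free staged computation: flatten to pairs,
-- dedup the uids in first-appearance order, then total each uid by scanning the pairs.
-- Neither version mutates its arguments.

-- user[k]: the record arrives as a Python dict built from the pairs; under Pre_ the key is
-- present, so the 0 default is never reached.
def pvField (user : List (String × Int)) (k : String) : Int :=
  (PySem.Dict.ofList user).getD k 0

-- ===== PORT A =====
-- the inner helper 'merge': merged[uid] = merged.get(uid, 0) + amt over one source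
def pvMergeA (m : PySem.Dict Int Int) (source : List (List (String × Int))) : PySem.Dict Int Int :=
  source.foldl (fun m u =>
    m.insert (pvField u "user_id") (m.getD (pvField u "user_id") 0 + pvField u "amount")) m

def merge_and_sum_purchases (sourceA : List (List (String × Int))) (sourceB : List (List (String × Int))) : List (List (String × Int)) :=
  (pvMergeA (pvMergeA PySem.Dict.empty sourceA) sourceB).items.map
    (fun p => [("user_id", p.1), ("amount", p.2)])

-- ===== PORT B =====
-- the (uid, amount) pair of one record
def pvPair (u : List (String × Int)) : Int × Int :=
  (pvField u "user_id", pvField u "amount")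

-- 'sum(a for p, a in pairs if p == uid)'
def pvTotal (pairs : List (Int × Int)) (uid : Int) : Int :=
  ((pairs.filter (fun q => q.1 == uid)).map (·.2)).sum

-- 'for uid, _ in pairs: if uid not in uids: uids.append(uid)' — first-occurrence dedup
def pvUids (pairs : List (Int × Int)) : PySem.Set Int :=
  pairs.foldl (fun us q => PySem.Set.add us q.1) PySem.Set.empty

def merge_and_sum_purchases_alt (sourceA : List (List (String × Int))) (sourceB : List (List (String × Int))) : List (List (String × Int)) :=
  (pvUids (sourceA.map pvPair ++ sourceB.map pvPair)).map
    (fun uid => [("user_id", uid), ("amount", pvTotal (sourceA.map pvPair ++ sourceB.map pvPair) uid)])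

-- ===== PRECONDITION & SPEC =====
-- Pre_ excludes exactly the inputs on which A raises KeyError: a record lacking the
-- "user_id" or the "amount" key (B raises there too).
def Pre_merge_and_sum_purchases (sourceA : List (List (String × Int))) (sourceB : List (List (String × Int))) : Prop :=
  ((sourceA ++ sourceB).all (fun r =>
    (r.map (·.1)).contains "user_id" && (r.map (·.1)).contains "amount")) = true
instance (sourceA : List (List (String × Int))) (sourceB : List (List (String × Int))) : Decidable (Pre_merge_and_sum_purchases sourceA sourceB) := by unfold Pre_merge_and_sum_purchases; infer_instance

def pvWitness_merge_and_sum_purchases : (List (List (String × Int))) × (List (List (String × Int))) :=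
  ([[("user_id", 1), ("amount", 5)], [("user_id", 2), ("amount", 3)]],
   [[("user_id", 1), ("amount", 4)]])

def Spec_merge_and_sum_purchases (sourceA : List (List (String × Int))) (sourceB : List (List (String × Int))) (out : List (List (String × Int))) : Prop := out = merge_and_sum_purchases_alt sourceA sourceB
instance (sourceA : List (List (String × Int))) (sourceB : List (List (String × Int))) (out : List (List (String × Int))) : Decidable (Spec_merge_and_sum_purchases sourceA sourceB out) := by unfold Spec_merge_and_sum_purchases; infer_instance

-- ===== CLAIM (what is proved, stated in full; the proofs are below) =====
def Claim_equal_merge_and_sum_purchases : Prop := ∀ (sourceA : List (List (String × Int))) (sourceB : List (List (String × Int))), Dom_merge_and_sum_purchases sourceA sourceB → Pre_merge_and_sum_purchases sourceA sourceB → Spec_merge_and_sum_purchases sourceA sourceB (merge_and_sum_purchases sourceA sourceB)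

-- ===== LEMMAS AND PROOFS =====

-- A's record step is B's pair step through pvPair
theorem pvMergeA_eq_foldl_pairs (m : PySem.Dict Int Int) (l : List (List (String × Int))) :
    pvMergeA m l = (l.map pvPair).foldl
      (fun m q => m.insert q.1 (m.getD q.1 0 + q.2)) m := by
  rw [List.foldl_map]; rfl

-- the aggregated value at each key is the brute-force total over the pairs
theorem pvGetD_foldl (pairs : List (Int × Int)) (m : PySem.Dict Int Int) (k : Int) :
    (pairs.foldl (fun m q => m.insert q.1 (m.getD q.1 0 + q.2)) m).getD k 0
      = m.getD k 0 + pvTotal pairs k := by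
  induction pairs generalizing m with
  | nil => simp [pvTotal]
  | cons q t ih =>
    rw [List.foldl_cons, ih]
    by_cases h : k = q.1
    · subst h
      simp [pvTotal, PySem.Dict.getD_insert_self]
      ring
    · rw [PySem.Dict.getD_insert]
      have hb : (q.1 == k) = false := by
        simp; exact fun e => h e.symm
      simp [h, pvTotal, hb]

-- ===== VERDICT (by name: the statement is the Claim_ definition above) =====
theorem merge_and_sum_purchases_spec : Claim_equal_merge_and_sum_purchases := by
  intro sourceA sourceB _ _
  show merge_and_sum_purchases sourceA sourceB = merge_and_sum_purchases_alt sourceA sourceB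
  unfold merge_and_sum_purchases merge_and_sum_purchases_alt pvUids
  rw [pvMergeA_eq_foldl_pairs, pvMergeA_eq_foldl_pairs, ← List.foldl_append]
  set pairs := sourceA.map pvPair ++ sourceB.map pvPair with hpairs
  set merged := pairs.foldl (fun m q => m.insert q.1 (m.getD q.1 0 + q.2)) PySem.Dict.empty with hm
  have hnd : merged.keys.Nodup := by
    rw [hm]
    exact PySem.Dict.nodup_keys_foldl_insert_key pairs (·.1) _ _ PySem.Dict.nodup_keys_empty
  have hkeys : merged.keys = pairs.foldl (fun us q => PySem.Set.add us q.1) PySem.Set.empty := by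
    rw [hm, PySem.Dict.keys_foldl_insert_key, ← PySem.Set.update_map_eq_foldl_add]
    rfl
  rw [PySem.Dict.items_eq_map_keys merged hnd 0, List.map_map, hkeys]
  apply List.map_congr_left
  intro k _
  have := pvGetD_foldl pairs PySem.Dict.empty k
  rw [← hm] at this
  simp [Function.comp, this, PySem.Dict.getD_empty]
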